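-- pv_equiv track=rewrite | github.com/denisbeslic/denovopipeline | resources/PointNovo_backup/config.py | var_mod_peptide_transform
-- ===== SOURCE A (Python) =====
-- from itertools import combinations
--
-- var_mod_dict = {'M': 'M(Oxidation)'}
--
-- max_num_mod = 3
--
-- def _find_all_ptm(peptide, position_list):
--     if len(position_list) == 0:
--         return [peptide]
--     position = position_list[0]
--     aa = peptide[position]
--     result = []
--     temp = peptide[:]
--     temp[position] = var_mod_dict[aa]
--     result += _find_all_ptm(temp, position_list[1:])
--     return result
--
-- def var_mod_peptide_transform(peptide: list):
--     """
--     apply var modification transform on a peptide, the max number of var mod is max_num_mod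
--     :param peptide:
--     :return:
--     """
--     position_list = [position for position, aa in enumerate(peptide) if aa in var_mod_dict]
--     position_count = len(position_list)
--     num_mod = min(position_count, max_num_mod)
--     position_combination_list = []
--     for x in range(1, num_mod+1):
--         position_combination_list += combinations(position_list, x)
--     # find all ptm peptides
--     ptm_peptide_list = []
--     for position_combination in position_combination_list:
--         ptm_peptide_list += _find_all_ptm(peptide, position_combination)
--     return ptm_peptide_list
-- ===== SOURCE B (Python) =====
-- from itertools import combinations
--
-- var_mod_dict = {'M': 'M(Oxidation)'}
--
-- max_num_mod = 3
--
-- def var_mod_peptide_transform(peptide: list):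
--     positions = [i for i, aa in enumerate(peptide) if aa in var_mod_dict]
--     num_mod = min(len(positions), max_num_mod)
--     result = []
--     for x in range(1, num_mod + 1):
--         for combo in combinations(positions, x):
--             temp = peptide[:]
--             for pos in combo:
--                 temp[pos] = var_mod_dict[temp[pos]]
--             result.append(temp)
--     return result
-- ===== Notes on version B (the rewrite author's own statement) =====
-- stated objective: simpler
-- what changed: Drops the recursive accumulator-threaded _find_all_ptm helper and the intermediate list of all position combinations: one flat nested loop applies each combination's modifications to a single fresh copy and appends it directly.
import Mathlib
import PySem

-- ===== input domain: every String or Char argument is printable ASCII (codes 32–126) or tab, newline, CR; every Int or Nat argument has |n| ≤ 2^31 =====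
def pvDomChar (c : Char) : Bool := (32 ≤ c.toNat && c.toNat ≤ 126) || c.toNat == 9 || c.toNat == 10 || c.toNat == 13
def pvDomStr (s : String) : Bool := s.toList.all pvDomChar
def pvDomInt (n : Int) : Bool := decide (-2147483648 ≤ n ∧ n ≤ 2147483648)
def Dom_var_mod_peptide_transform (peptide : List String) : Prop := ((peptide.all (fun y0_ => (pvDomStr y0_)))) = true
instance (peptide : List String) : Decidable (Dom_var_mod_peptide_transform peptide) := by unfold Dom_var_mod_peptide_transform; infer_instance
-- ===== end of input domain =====

-- B replaces the recursive accumulator-threaded _find_all_ptm helper and the pre-built list of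
-- all position combinations by one flat nested loop (simpler decomposition, same cost).

-- ===== PORT A =====

def pvVarModDict : PySem.Dict String String := PySem.Dict.ofList [("M", "M(Oxidation)")]

-- _find_all_ptm. The indexing peptide[position] and the dict lookup var_mod_dict[aa] are ported
-- with the total getD forms: positions always come from enumerate-filtered indices, so the index
-- is in range and the key is present (exact wherever the Python returns).
def pvFindAllPtm (peptide : List String) (position_list : List Int) : List (List String) :=
  match position_list with
  | [] => [peptide]
  | position :: rest =>
      let aa := PySem.List.pyGetD peptide position ""
      let temp := PySem.List.pySetD peptide position (PySem.Dict.getD pvVarModDict aa "")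
      [] ++ pvFindAllPtm temp rest

def var_mod_peptide_transform (peptide : List String) : List (List String) :=
  let position_list := ((PySem.List.enumerate peptide).filter
    (fun pa => PySem.Dict.contains pvVarModDict pa.2)).map (·.1)
  let num_mod := min position_list.length 3
  let position_combination_list :=
    (PySem.List.pyRange 1 ((num_mod : Int) + 1) 1).foldl
      (fun acc x => acc ++ PySem.List.combinations position_list x.toNat) []
  position_combination_list.foldl (fun acc c => acc ++ pvFindAllPtm peptide c) []

-- ===== PORT B =====

def var_mod_peptide_transform_alt (peptide : List String) : List (List String) :=
  let positions := ((PySem.List.enumerate peptide).filter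
    (fun pa => PySem.Dict.contains pvVarModDict pa.2)).map (·.1)
  let num_mod := min positions.length 3
  (List.range num_mod).foldl
    (fun acc x =>
      acc ++ (PySem.List.combinations positions (x + 1)).map
        (fun combo =>
          combo.foldl
            (fun temp pos =>
              PySem.List.pySetD temp pos
                (PySem.Dict.getD pvVarModDict (PySem.List.pyGetD temp pos "") ""))
            peptide))
    []

-- ===== PRECONDITION & SPEC =====
def Spec_var_mod_peptide_transform (peptide : List String) (out : List (List String)) : Prop := out = var_mod_peptide_transform_alt peptide
instance (peptide : List String) (out : List (List String)) : Decidable (Spec_var_mod_peptide_transform peptide out) := by unfold Spec_var_mod_peptide_transform; infer_instance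

-- ===== CLAIM (what is proved, stated in full; the proofs are below) =====
def Claim_equal_var_mod_peptide_transform : Prop := ∀ (peptide : List String), Dom_var_mod_peptide_transform peptide → Spec_var_mod_peptide_transform peptide (var_mod_peptide_transform peptide)

-- ===== LEMMAS AND PROOFS =====

-- _find_all_ptm returns the singleton list of the fold applying all modifications in order.
theorem pvFindAllPtm_eq_foldl (position_list : List Int) (peptide : List String) :
    pvFindAllPtm peptide position_list =
      [position_list.foldl
        (fun temp pos =>
          PySem.List.pySetD temp pos
            (PySem.Dict.getD pvVarModDict (PySem.List.pyGetD temp pos "") ""))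
        peptide] := by
  induction position_list generalizing peptide with
  | nil => rfl
  | cons p rest ih => simp [pvFindAllPtm, ih, List.foldl]

-- Appending singletons is mapping.
theorem foldl_append_singleton {α β : Type} (l : List α) (g : α → β) (init : List β) :
    l.foldl (fun acc c => acc ++ [g c]) init = init ++ l.map g := by
  induction l generalizing init with
  | nil => simp
  | cons c rest ih => simp [List.foldl, ih]

-- Mapping distributes over an append-accumulating fold.
theorem foldl_append_map {α β γ : Type} (l : List α) (C : α → List β) (g : β → γ)
    (init : List β) :
    (l.foldl (fun acc i => acc ++ C i) init).map g =
      l.foldl (fun acc i => acc ++ (C i).map g) (init.map g) := by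
  induction l generalizing init with
  | nil => rfl
  | cons i rest ih => rw [List.foldl_cons, List.foldl_cons, ih, List.map_append]

-- A's Int range over [1, n+1) folds the same bodies as B's Nat range over [0, n).
theorem foldl_pyRange_eq_range {β : Type} (n : Nat) (C : Nat → List β) (init : List β) :
    (PySem.List.pyRange 1 ((n : Int) + 1) 1).foldl
        (fun acc x => acc ++ C x.toNat) init =
      (List.range n).foldl (fun acc k => acc ++ C (k + 1)) init := by
  rw [PySem.List.pyRange_one]
  have h : ((n : Int) + 1 - 1).toNat = n := by omega
  rw [h, List.foldl_map]
  have h2 : ∀ (acc : List β) (k : Nat), acc ++ C ((1 + (k : Int)).toNat) = acc ++ C (k + 1) := by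
    intro acc k
    have : ((1 : Int) + (k : Int)).toNat = k + 1 := by omega
    rw [this]
  simp only [h2]

-- ===== VERDICT (by name: the statement is the Claim_ definition above) =====
theorem var_mod_peptide_transform_spec : Claim_equal_var_mod_peptide_transform := by
  intro peptide _
  unfold Spec_var_mod_peptide_transform var_mod_peptide_transform var_mod_peptide_transform_alt
  set positions := ((PySem.List.enumerate peptide).filter
    (fun pa => PySem.Dict.contains pvVarModDict pa.2)).map (·.1) with hpos
  set n := min positions.length 3 with hn
  set g : List Int → List String := fun combo =>
    combo.foldl
      (fun temp pos =>
        PySem.List.pySetD temp pos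
          (PySem.Dict.getD pvVarModDict (PySem.List.pyGetD temp pos "") ""))
      peptide with hg
  have hfind : ∀ c : List Int, pvFindAllPtm peptide c = [g c] := fun c =>
    pvFindAllPtm_eq_foldl c peptide
  simp only [hfind]
  rw [foldl_append_singleton, List.nil_append,
      foldl_pyRange_eq_range n (fun x => PySem.List.combinations positions x) [],
      foldl_append_map]
  rfl
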